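-- pv_equiv track=rewrite | github.com/omelyanchikd/leetcode | indexDiff.py | index_check
-- ===== SOURCE A (Python) =====
-- def index_check(indexes_a, indexes_b, indexDifference):
--     i_star = -1
--     j_star = -1
--     for i in indexes_a:
--         for j in indexes_b:
--             if abs(i - j) >= indexDifference:
--                 i_star = i
--                 j_star = j
--                 break
--     return i_star, j_star
-- ===== SOURCE B (Python) =====
-- def index_check(indexes_a, indexes_b, indexDifference):
--     if not indexes_b:
--         return -1, -1
--     lo = min(indexes_b)
--     hi = max(indexes_b)
--     # a far-enough j exists for i  iff  some j <= i-d or some j >= i+d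
--     for i in reversed(indexes_a):
--         if lo <= i - indexDifference or i + indexDifference <= hi:
--             for j in indexes_b:
--                 if abs(i - j) >= indexDifference:
--                     return i, j
--     return -1, -1
-- ===== Notes on version B (the rewrite author's own statement) =====
-- stated objective: faster
-- what changed: Instead of scanning all of indexes_b for every element of indexes_a, B precomputes min/max of indexes_b for an O(1) existence test, walks indexes_a backwards to the last element with a far-enough partner, and scans indexes_b once for its first partner.
import Mathlib
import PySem

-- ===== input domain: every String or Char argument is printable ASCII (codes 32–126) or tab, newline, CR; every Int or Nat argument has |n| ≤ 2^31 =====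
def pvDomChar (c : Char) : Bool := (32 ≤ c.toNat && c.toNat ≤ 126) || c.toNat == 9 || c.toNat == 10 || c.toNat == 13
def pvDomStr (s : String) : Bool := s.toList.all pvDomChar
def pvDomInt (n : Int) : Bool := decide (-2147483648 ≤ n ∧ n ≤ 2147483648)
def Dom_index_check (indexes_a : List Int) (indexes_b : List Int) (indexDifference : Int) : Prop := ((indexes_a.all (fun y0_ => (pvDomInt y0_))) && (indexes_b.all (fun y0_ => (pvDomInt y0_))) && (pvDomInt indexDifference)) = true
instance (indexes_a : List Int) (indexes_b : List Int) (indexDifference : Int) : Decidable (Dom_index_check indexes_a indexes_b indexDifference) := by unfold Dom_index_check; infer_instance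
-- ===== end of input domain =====

-- B replaces A's O(n*m) nested scan by a min/max O(1) existence test over indexes_b,
-- a single backward scan of indexes_a and one forward scan of indexes_b (O(n+m)).


-- ===== PORT A =====
-- outer loop over indexes_a keeps (i_star, j_star); inner loop with break = first j with |i-j| >= d
def index_check (indexes_a : List Int) (indexes_b : List Int) (indexDifference : Int) : List Int :=
  let st := indexes_a.foldl
    (fun (s : Int × Int) i =>
      match indexes_b.find? (fun j => decide (indexDifference ≤ |i - j|)) with
      | some j => (i, j)
      | none => s)
    ((-1 : Int), (-1 : Int))
  [st.1, st.2]

-- ===== PORT B =====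
def index_check_alt (indexes_a : List Int) (indexes_b : List Int) (indexDifference : Int) : List Int :=
  match PySem.List.min? indexes_b (fun x => x), PySem.List.max? indexes_b (fun x => x) with
  | some lo, some hi =>
    match indexes_a.reverse.find? (fun i => decide (lo ≤ i - indexDifference ∨ i + indexDifference ≤ hi)) with
    | some i =>
      match indexes_b.find? (fun j => decide (indexDifference ≤ |i - j|)) with
      | some j => [i, j]
      | none => [-1, -1]
    | none => [-1, -1]
  | _, _ => [-1, -1]

-- ===== PRECONDITION & SPEC =====
def Spec_index_check (indexes_a : List Int) (indexes_b : List Int) (indexDifference : Int) (out : List Int) : Prop := out = index_check_alt indexes_a indexes_b indexDifference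
instance (indexes_a : List Int) (indexes_b : List Int) (indexDifference : Int) (out : List Int) : Decidable (Spec_index_check indexes_a indexes_b indexDifference out) := by unfold Spec_index_check; infer_instance

-- ===== CLAIM (what is proved, stated in full; the proofs are below) =====
def Claim_equal_index_check : Prop := ∀ (indexes_a : List Int) (indexes_b : List Int) (indexDifference : Int), Dom_index_check indexes_a indexes_b indexDifference → Spec_index_check indexes_a indexes_b indexDifference (index_check indexes_a indexes_b indexDifference)

-- ===== LEMMAS AND PROOFS =====

-- A's fold in terms of the first match on the reversed list
theorem foldA_eq_revFind (b : List Int) (d : Int) (a : List Int) (s : Int × Int) :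
    a.foldl
      (fun (s : Int × Int) i =>
        match b.find? (fun j => decide (d ≤ |i - j|)) with
        | some j => (i, j)
        | none => s) s
      =
    match a.reverse.find? (fun i => (b.find? (fun j => decide (d ≤ |i - j|))).isSome) with
    | some i =>
      match b.find? (fun j => decide (d ≤ |i - j|)) with
      | some j => (i, j)
      | none => s
    | none => s := by
  induction a generalizing s with
  | nil => simp
  | cons x xs ih =>
    simp only [List.foldl_cons, List.reverse_cons, List.find?_append]
    rw [ih]
    cases hx : xs.reverse.find? (fun i => (b.find? (fun j => decide (d ≤ |i - j|))).isSome) with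
    | some i =>
      have hs := List.find?_some hx
      simp only [Option.isSome_iff_exists] at hs
      obtain ⟨j, hj⟩ := hs
      simp [hj]
    | none =>
      simp only [Option.none_or]
      cases hb : b.find? (fun j => decide (d ≤ |x - j|)) with
      | some j => simp [List.find?, Option.isSome, hb]
      | none => simp [List.find?, Option.isSome, hb]


-- existence of a far-enough partner ↔ the min/max test
theorem exists_iff_minmax (b : List Int) (d lo hi i : Int)
    (hlo : PySem.List.min? b (fun x => x) = some lo)
    (hhi : PySem.List.max? b (fun x => x) = some hi) :
    (b.find? (fun j => decide (d ≤ |i - j|))).isSome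
      = decide (lo ≤ i - d ∨ i + d ≤ hi) := by
  have hlomem := PySem.List.min?_mem hlo
  have hhimem := PySem.List.max?_mem hhi
  have hloMin := PySem.List.min?_isMin hlo
  have hhiMax := PySem.List.max?_isMax hhi
  by_cases h : lo ≤ i - d ∨ i + d ≤ hi
  · simp only [h, decide_true]
    rw [List.find?_isSome]
    rcases h with h | h
    · exact ⟨lo, hlomem, by simp [le_abs]; omega⟩
    · exact ⟨hi, hhimem, by simp [le_abs]; omega⟩
  · simp only [h, decide_false]
    rw [Bool.eq_false_iff, Ne, Option.isSome_iff_exists]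
    rintro ⟨j, hj⟩
    have hmem := List.find?_some hj
    have hjm := List.mem_of_find?_eq_some hj
    have h1 := hloMin j hjm
    have h2 := hhiMax j hjm
    simp only [decide_eq_true_eq, le_abs] at hmem
    simp only at h1 h2
    omega

theorem index_check_eq (indexes_a indexes_b : List Int) (d : Int) :
    index_check indexes_a indexes_b d = index_check_alt indexes_a indexes_b d := by
  unfold index_check index_check_alt
  cases hlo : PySem.List.min? indexes_b (fun x => x) with
  | none =>
    have hb : indexes_b = [] := (PySem.List.min?_eq_none_iff _ _).1 hlo
    subst hb
    simp
  | some lo =>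
    cases hhi : PySem.List.max? indexes_b (fun x => x) with
    | none =>
      have hb : indexes_b = [] := (PySem.List.max?_eq_none_iff _ _).1 hhi
      subst hb
      simp [PySem.List.min?] at hlo
    | some hi =>
      rw [foldA_eq_revFind]
      have hpred : (fun i => (indexes_b.find? (fun j => decide (d ≤ |i - j|))).isSome)
          = (fun i => decide (lo ≤ i - d ∨ i + d ≤ hi)) := by
        funext i; exact exists_iff_minmax indexes_b d lo hi i hlo hhi
      rw [hpred]
      cases hfi : indexes_a.reverse.find? (fun i => decide (lo ≤ i - d ∨ i + d ≤ hi)) with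
      | none => simp only [Bool.decide_or] at hfi ⊢; simp [hfi]
      | some i =>
        cases hfj : indexes_b.find? (fun j => decide (d ≤ |i - j|)) with
        | none => simp only [Bool.decide_or] at hfi ⊢; simp [hfi, hfj]
        | some j => simp only [Bool.decide_or] at hfi ⊢; simp [hfi, hfj]

-- ===== VERDICT (by name: the statement is the Claim_ definition above) =====
theorem index_check_spec : Claim_equal_index_check := by
  intro a b d _
  unfold Spec_index_check
  exact index_check_eq a b d
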